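-- pv_equiv track=rewrite | github.com/C0d3V1r0/ddsds | server/ml/baseline.py | _build_maintenance_windows
-- ===== SOURCE A (Python) =====
-- def _build_maintenance_windows(
--     maintenance_timestamps: list[int],
--     maintenance_window_seconds: int,
-- ) -> list[tuple[int, int]]:
--     return _merge_intervals([
--         (timestamp - maintenance_window_seconds, timestamp + maintenance_window_seconds)
--         for timestamp in maintenance_timestamps
--     ])
--
-- def _merge_intervals(intervals: list[tuple[int, int]]) -> list[tuple[int, int]]:
--     if not intervals:
--         return []
--     intervals.sort()
--     merged: list[tuple[int, int]] = [intervals[0]]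
--     for start, end in intervals[1:]:
--         last_start, last_end = merged[-1]
--         if start <= last_end:
--             merged[-1] = (last_start, max(last_end, end))
--         else:
--             merged.append((start, end))
--     return merged
-- ===== SOURCE B (Python) =====
-- def _build_maintenance_windows(
--     maintenance_timestamps: list[int],
--     maintenance_window_seconds: int,
-- ) -> list[tuple[int, int]]:
--     # Gap scan: sort the timestamps themselves and cut a new window wherever
--     # two consecutive timestamps are more than 2*w apart; no interval list,
--     # no tuple sort, no max().  Does not mutate the input list.
--     if not maintenance_timestamps:
--         return []
--     w = maintenance_window_seconds
--     ordered = sorted(maintenance_timestamps)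
--     windows: list[tuple[int, int]] = []
--     start = prev = ordered[0]
--     for t in ordered[1:]:
--         if t - prev > 2 * w:
--             windows.append((start - w, prev + w))
--             start = t
--         prev = t
--     windows.append((start - w, prev + w))
--     return windows
-- ===== Notes on version B (the rewrite author's own statement) =====
-- stated objective: faster
-- what changed: Instead of materialising one interval tuple per timestamp, lexicographically sorting the tuple list and merging by comparing each interval against the last merged tuple (with max), B sorts the raw timestamps once and does a gap scan: a new window is cut exactly where two consecutive sorted timestamps are more than 2*w apart, emitting (first-w, last+w) per run.
import Mathlib
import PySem

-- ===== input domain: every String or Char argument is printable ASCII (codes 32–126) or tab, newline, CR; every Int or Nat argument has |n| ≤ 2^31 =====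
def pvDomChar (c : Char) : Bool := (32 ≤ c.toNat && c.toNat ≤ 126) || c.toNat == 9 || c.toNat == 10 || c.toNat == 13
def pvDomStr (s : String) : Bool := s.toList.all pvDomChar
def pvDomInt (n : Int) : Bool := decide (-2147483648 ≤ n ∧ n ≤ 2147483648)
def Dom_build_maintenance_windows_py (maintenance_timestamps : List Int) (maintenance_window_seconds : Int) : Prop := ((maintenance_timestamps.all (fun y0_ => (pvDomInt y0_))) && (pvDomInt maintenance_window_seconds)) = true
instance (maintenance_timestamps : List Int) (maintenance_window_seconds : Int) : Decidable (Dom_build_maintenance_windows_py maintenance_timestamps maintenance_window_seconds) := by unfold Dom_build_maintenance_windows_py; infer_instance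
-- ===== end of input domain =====

-- B replaces A's build-intervals / tuple-sort / merge-against-last-tuple pipeline by a single
-- gap scan over the sorted timestamps (objective: faster — no intermediate tuple list, plain int sort; constant-factor, measured).

-- ===== PORT A =====
-- _merge_intervals: intervals.sort(); merged = [intervals[0]]; loop over intervals[1:]
-- reading merged[-1] (pyGet? (-1); merged is never empty, the none branch is unreachable)
-- and either rewriting merged[-1] or appending.
def pvMergeStep (merged : List (Int × Int)) (p : Int × Int) : List (Int × Int) :=
  match PySem.List.pyGet? merged (-1) with
  | none => merged
  | some last =>
      if p.1 ≤ last.2 then merged.dropLast ++ [(last.1, max last.2 p.2)]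
      else merged ++ [p]

def pvMergeIntervals (intervals : List (Int × Int)) : List (Int × Int) :=
  if intervals = [] then []
  else
    match PySem.List.sorted2 intervals Prod.fst Prod.snd with
    | [] => []
    | h :: rest => rest.foldl pvMergeStep [h]

def build_maintenance_windows_py (maintenance_timestamps : List Int) (maintenance_window_seconds : Int) : List (Int × Int) :=
  pvMergeIntervals (maintenance_timestamps.map
    (fun timestamp => (timestamp - maintenance_window_seconds, timestamp + maintenance_window_seconds)))

-- ===== PORT B =====
def build_maintenance_windows_py_alt (maintenance_timestamps : List Int) (maintenance_window_seconds : Int) : List (Int × Int) :=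
  match PySem.List.sorted maintenance_timestamps (fun x => x) with
  | [] => []
  | s0 :: rest =>
      let w := maintenance_window_seconds
      let st := rest.foldl
        (fun (acc : List (Int × Int) × Int × Int) t =>
          let out := acc.1
          let start := acc.2.1
          let prev := acc.2.2
          if 2 * w < t - prev then (out ++ [(start - w, prev + w)], t, t)
          else (out, start, t))
        ([], s0, s0)
      st.1 ++ [(st.2.1 - w, st.2.2 + w)]

-- ===== PRECONDITION & SPEC =====
def Spec_build_maintenance_windows_py (maintenance_timestamps : List Int) (maintenance_window_seconds : Int) (out : List (Int × Int)) : Prop := out = build_maintenance_windows_py_alt maintenance_timestamps maintenance_window_seconds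
instance (maintenance_timestamps : List Int) (maintenance_window_seconds : Int) (out : List (Int × Int)) : Decidable (Spec_build_maintenance_windows_py maintenance_timestamps maintenance_window_seconds out) := by unfold Spec_build_maintenance_windows_py; infer_instance

-- ===== CLAIM (what is proved, stated in full; the proofs are below) =====
def Claim_equal_build_maintenance_windows_py : Prop := ∀ (maintenance_timestamps : List Int) (maintenance_window_seconds : Int), Dom_build_maintenance_windows_py maintenance_timestamps maintenance_window_seconds → Spec_build_maintenance_windows_py maintenance_timestamps maintenance_window_seconds (build_maintenance_windows_py maintenance_timestamps maintenance_window_seconds)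

-- ===== LEMMAS AND PROOFS =====

-- sorting the interval list lexicographically = sorting the timestamps and mapping
theorem pv_insertBy_map (w x : Int) (l : List Int) :
    PySem.List.insertBy
      (fun a b : Int × Int => decide (a.1 < b.1) || !decide (b.1 < a.1) && decide (a.2 < b.2))
      (x - w, x + w) (l.map (fun t => (t - w, t + w)))
    = (PySem.List.insertBy (fun a b : Int => decide (a < b)) x l).map (fun t => (t - w, t + w)) := by
  induction l with
  | nil => simp [PySem.List.insertBy]
  | cons y ys ih =>
      simp only [List.map_cons, PySem.List.insertBy]
      by_cases h : x < y
      · have h1 : x - w < y - w := by omega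
        simp [h, h1]
      · have h1 : ¬ (x - w < y - w) := by omega
        by_cases h2 : y < x
        · have h3 : y - w < x - w := by omega
          simp [h, h1, h3, ih]
        · have h3 : ¬ (y - w < x - w) := by omega
          have h4 : ¬ (x + w < y + w) := by omega
          simp [h, h1, h3, h4, ih]

theorem pv_foldl_insert_map (w : Int) (ts acc : List Int) :
    List.foldl
      (fun acc x => PySem.List.insertBy
        (fun a b : Int × Int => decide (a.1 < b.1) || !decide (b.1 < a.1) && decide (a.2 < b.2)) x acc)
      (acc.map (fun t => (t - w, t + w))) (ts.map (fun t => (t - w, t + w)))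
    = (List.foldl (fun acc x => PySem.List.insertBy (fun a b : Int => decide (a < b)) x acc) acc ts).map
        (fun t => (t - w, t + w)) := by
  induction ts generalizing acc with
  | nil => simp
  | cons x xs ih =>
      simp only [List.map_cons, List.foldl_cons]
      rw [pv_insertBy_map, ih]

theorem pv_sorted2_map (w : Int) (ts : List Int) :
    PySem.List.sorted2 (ts.map (fun t => (t - w, t + w))) Prod.fst Prod.snd
    = (PySem.List.sorted ts (fun x => x)).map (fun t => (t - w, t + w)) := by
  rw [PySem.List.sorted_eq_foldl_insertBy]
  exact pv_foldl_insert_map w ts []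

-- the merge loop over the mapped sorted tail equals B's gap-scan loop
theorem pv_loop_eq (w : Int) (rest : List Int) (out : List (Int × Int)) (start prev : Int)
    (hs : (prev :: rest).Pairwise (· ≤ ·)) :
    (rest.map (fun t => (t - w, t + w))).foldl pvMergeStep (out ++ [(start - w, prev + w)])
    = (let st := rest.foldl
        (fun (acc : List (Int × Int) × Int × Int) t =>
          if 2 * w < t - acc.2.2 then (acc.1 ++ [(acc.2.1 - w, acc.2.2 + w)], t, t)
          else (acc.1, acc.2.1, t))
        (out, start, prev)
       st.1 ++ [(st.2.1 - w, st.2.2 + w)]) := by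
  induction rest generalizing out start prev with
  | nil => simp
  | cons t rs ih =>
      rcases List.pairwise_cons.mp hs with ⟨hle, hrest⟩
      have hpt : prev ≤ t := hle t (List.mem_cons_self)
      have hs' : (t :: rs).Pairwise (· ≤ ·) := hrest
      simp only [List.map_cons, List.foldl_cons]
      have hget : PySem.List.pyGet? (out ++ [(start - w, prev + w)]) (-1)
          = some (start - w, prev + w) := by
        simp [PySem.List.pyGet?, PySem.List.pyIdx?]
      by_cases hc : 2 * w < t - prev
      · have hc' : ¬ (t - w ≤ prev + w) := by omega
        have : pvMergeStep (out ++ [(start - w, prev + w)]) (t - w, t + w)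
            = (out ++ [(start - w, prev + w)]) ++ [(t - w, t + w)] := by
          simp [pvMergeStep, hget, hc']
        rw [this]
        have := ih (out ++ [(start - w, prev + w)]) t t hs'
        simpa [hc] using this
      · have hc' : t - w ≤ prev + w := by omega
        have hmax : max (prev + w) (t + w) = t + w := by omega
        have : pvMergeStep (out ++ [(start - w, prev + w)]) (t - w, t + w)
            = out ++ [(start - w, t + w)] := by
          simp [pvMergeStep, hget, hc', hmax]
        rw [this]
        have hs'' : (t :: rs).Pairwise (· ≤ ·) := hs'
        have := ih out start t hs''
        simpa [hc] using this

-- ===== VERDICT (by name: the statement is the Claim_ definition above) =====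
theorem build_maintenance_windows_py_spec : Claim_equal_build_maintenance_windows_py := by
  intro ts w _
  unfold Spec_build_maintenance_windows_py
  unfold build_maintenance_windows_py build_maintenance_windows_py_alt pvMergeIntervals
  by_cases hts : ts = []
  · subst hts; simp [PySem.List.sorted]
  · have hmap : ts.map (fun t => (t - w, t + w)) ≠ [] := by
      simpa using hts
    rw [if_neg hmap, pv_sorted2_map]
    have hsnil : PySem.List.sorted ts (fun x => x) ≠ [] := by
      rw [Ne, PySem.List.sorted_eq_nil_iff]; exact hts
    obtain ⟨s0, rest, hs⟩ : ∃ s0 rest, PySem.List.sorted ts (fun x => x) = s0 :: rest := by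
      cases h : PySem.List.sorted ts (fun x => x) with
      | nil => exact absurd h hsnil
      | cons a l => exact ⟨a, l, rfl⟩
    rw [hs]
    have hpw : (s0 :: rest).Pairwise (· ≤ ·) := by
      have := PySem.List.sorted_pairwise (xs := ts) (key := fun x => x)
      rw [hs] at this
      exact this
    have := pv_loop_eq w rest [] s0 s0 hpw
    simpa using this
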